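-- pv_equiv track=rewrite | github.com/adamelid/PythonVerk | Assignment16/top100ChessP1.py | get_points_per_country
-- ===== SOURCE A (Python) =====
-- def get_points_per_country(chess_players_dict):
--     my_dict = {}
--
--     for chess_players_dict in chess_players_dict.items():
--         country = chess_players_dict[1][1]
--         if country in my_dict:
--             my_dict[country][0] += 1
--             my_dict[country][1] += chess_players_dict[1][2]
--
--         else:
--             data = [1, chess_players_dict[1][2]]
--             my_dict[country] = data
--
--     return my_dict
-- ===== SOURCE B (Python) =====
-- def get_points_per_country(chess_players_dict):
--     # Phase 1: group the point values by country.
--     groups = {}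
--     for value in chess_players_dict.values():
--         groups.setdefault(value[1], []).append(value[2])
--     # Phase 2: reduce each group to [count, total].
--     return {country: [len(pts), sum(pts)] for country, pts in groups.items()}
-- ===== Notes on version B (the rewrite author's own statement) =====
-- stated objective: alternative
-- what changed: Replaces A's single-pass inline count+sum accumulation with a two-phase group-then-reduce: first build a dict mapping each country to the list of its point values, then map each group to [len, sum].
import Mathlib
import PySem

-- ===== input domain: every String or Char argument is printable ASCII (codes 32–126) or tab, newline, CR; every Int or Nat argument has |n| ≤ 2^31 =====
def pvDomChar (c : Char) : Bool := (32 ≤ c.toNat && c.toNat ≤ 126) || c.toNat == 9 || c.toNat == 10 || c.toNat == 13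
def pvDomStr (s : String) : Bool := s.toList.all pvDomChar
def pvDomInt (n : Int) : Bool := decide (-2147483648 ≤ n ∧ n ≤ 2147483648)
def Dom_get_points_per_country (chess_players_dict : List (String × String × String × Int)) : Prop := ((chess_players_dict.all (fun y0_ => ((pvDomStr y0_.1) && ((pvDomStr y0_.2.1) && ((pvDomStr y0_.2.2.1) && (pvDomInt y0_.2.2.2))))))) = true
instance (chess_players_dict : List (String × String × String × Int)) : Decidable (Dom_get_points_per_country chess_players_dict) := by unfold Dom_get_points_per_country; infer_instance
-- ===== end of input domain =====

-- B: two-phase group-then-reduce (country -> points list, then [len, sum]) instead of A's inline count+sum accumulation; same O(n) cost, different decomposition.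
-- ===== PORT A =====
def get_points_per_country (chess_players_dict : List (String × String × String × Int)) : List (String × List Int) :=
  (chess_players_dict.foldl
    (fun my_dict p =>
      let country := p.2.2.1
      if my_dict.contains country then
        let v := my_dict.getD country []
        my_dict.insert country [v.getD 0 0 + 1, v.getD 1 0 + p.2.2.2]
      else
        my_dict.insert country [1, p.2.2.2])
    PySem.Dict.empty).items

-- ===== PORT B =====
-- Phase 1: group point values by country (setdefault + append = overwrite with appended list).
def gppcGroups (chess_players_dict : List (String × String × String × Int)) :
    PySem.Dict String (List Int) :=
  chess_players_dict.foldl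
    (fun groups p => groups.insert p.2.2.1 (groups.getD p.2.2.1 [] ++ [p.2.2.2]))
    PySem.Dict.empty

-- Phase 2: reduce each group to [count, total].
def get_points_per_country_alt (chess_players_dict : List (String × String × String × Int)) : List (String × List Int) :=
  (gppcGroups chess_players_dict).items.map (fun q => (q.1, [(q.2.length : Int), q.2.sum]))

-- ===== PRECONDITION & SPEC =====
def Spec_get_points_per_country (chess_players_dict : List (String × String × String × Int)) (out : List (String × List Int)) : Prop := out = get_points_per_country_alt chess_players_dict
instance (chess_players_dict : List (String × String × String × Int)) (out : List (String × List Int)) : Decidable (Spec_get_points_per_country chess_players_dict out) := by unfold Spec_get_points_per_country; infer_instance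

-- ===== CLAIM (what is proved, stated in full; the proofs are below) =====
def Claim_equal_get_points_per_country : Prop := ∀ (chess_players_dict : List (String × String × String × Int)), Dom_get_points_per_country chess_players_dict → Spec_get_points_per_country chess_players_dict (get_points_per_country chess_players_dict)

-- ===== LEMMAS AND PROOFS =====
-- f2 reduces one group; gppcMap applies the reduction to a grouping dict.
def gppcF2 (g : List Int) : List Int := [(g.length : Int), g.sum]

def gppcMap (d : PySem.Dict String (List Int)) : PySem.Dict String (List Int) :=
  PySem.Dict.mk (d.items.map (fun q => (q.1, gppcF2 q.2)))

theorem gppc_contains_map (d : PySem.Dict String (List Int)) (c : String) :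
    (gppcMap d).contains c = d.contains c := by
  simp [gppcMap, PySem.Dict.contains, List.any_map, Function.comp_def]

theorem gppc_get?_map (d : PySem.Dict String (List Int)) (c : String) :
    (gppcMap d).get? c = (d.get? c).map gppcF2 := by
  simp [gppcMap, PySem.Dict.get?, List.find?_map, Function.comp_def]

theorem gppc_insert_map (d : PySem.Dict String (List Int)) (c : String) (w : List Int) :
    (gppcMap d).insert c (gppcF2 w) = gppcMap (d.insert c w) := by
  simp only [PySem.Dict.insert, gppc_contains_map]
  split
  · simp only [gppcMap, List.map_map]
    congr 1
    apply List.map_congr_left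
    intro q _
    by_cases h : q.1 == c
    · simp [Function.comp, h]
    · simp [Function.comp, h]
  · simp [gppcMap]

theorem gppc_step (d : PySem.Dict String (List Int)) (p : String × String × String × Int) :
    (if (gppcMap d).contains p.2.2.1 = true then
      (gppcMap d).insert p.2.2.1
        [((gppcMap d).getD p.2.2.1 []).getD 0 0 + 1,
         ((gppcMap d).getD p.2.2.1 []).getD 1 0 + p.2.2.2]
    else (gppcMap d).insert p.2.2.1 [1, p.2.2.2])
    = gppcMap (d.insert p.2.2.1 (d.getD p.2.2.1 [] ++ [p.2.2.2])) := by
  rw [gppc_contains_map]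
  by_cases h : d.contains p.2.2.1 = true
  · have hs : (d.get? p.2.2.1).isSome := by
      rw [← PySem.Dict.contains_eq_isSome_get?]; exact h
    obtain ⟨g, hg⟩ := Option.isSome_iff_exists.mp hs
    have hA : (gppcMap d).getD p.2.2.1 [] = gppcF2 g := by
      simp [PySem.Dict.getD, gppc_get?_map, hg]
    have hB : d.getD p.2.2.1 [] = g := by simp [PySem.Dict.getD, hg]
    rw [if_pos h, hA, hB]
    have hv : [(gppcF2 g).getD 0 0 + 1, (gppcF2 g).getD 1 0 + p.2.2.2]
        = gppcF2 (g ++ [p.2.2.2]) := by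
      simp [gppcF2]
    rw [hv, gppc_insert_map]
  · have hn : d.get? p.2.2.1 = none := by
      rcases ho : d.get? p.2.2.1 with _ | g
      · rfl
      · exact absurd (by rw [PySem.Dict.contains_eq_isSome_get?, ho]; rfl) h
    have hB : d.getD p.2.2.1 [] = [] := by simp [PySem.Dict.getD, hn]
    rw [if_neg h, hB]
    have hv : ([1, p.2.2.2] : List Int) = gppcF2 ([] ++ [p.2.2.2]) := by simp [gppcF2]
    rw [hv, gppc_insert_map]

theorem gppc_fold (l : List (String × String × String × Int))
    (d : PySem.Dict String (List Int)) :
    l.foldl (fun my_dict p =>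
      let country := p.2.2.1
      if PySem.Dict.contains my_dict country then
        let v := my_dict.getD country []
        my_dict.insert country [v.getD 0 0 + 1, v.getD 1 0 + p.2.2.2]
      else
        my_dict.insert country [1, p.2.2.2]) (gppcMap d)
    = gppcMap (l.foldl (fun groups p =>
        PySem.Dict.insert groups p.2.2.1 (groups.getD p.2.2.1 [] ++ [p.2.2.2])) d) := by
  induction l generalizing d with
  | nil => rfl
  | cons p t ih =>
    simp only [List.foldl_cons]
    rw [gppc_step d p, ih]


-- ===== VERDICT (by name: the statement is the Claim_ definition above) =====
theorem get_points_per_country_spec : Claim_equal_get_points_per_country := by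
  intro l _
  show get_points_per_country l = get_points_per_country_alt l
  unfold get_points_per_country get_points_per_country_alt gppcGroups
  have h1 : (l.foldl (fun my_dict p =>
      let country := p.2.2.1
      if PySem.Dict.contains my_dict country then
        let v := my_dict.getD country []
        my_dict.insert country [v.getD 0 0 + 1, v.getD 1 0 + p.2.2.2]
      else
        my_dict.insert country [1, p.2.2.2]) PySem.Dict.empty)
      = gppcMap (l.foldl (fun groups p =>
        PySem.Dict.insert groups p.2.2.1 (groups.getD p.2.2.1 [] ++ [p.2.2.2])) PySem.Dict.empty) :=
    gppc_fold l PySem.Dict.empty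
  rw [h1]
  simp [gppcMap, gppcF2]
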